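-- pv_equiv track=rewrite | github.com/huynonstop/grinding-leetcode | leetcode/increasingTriplet.py | increasing_triplet_bf
-- ===== SOURCE A (Python) =====
-- def increasing_triplet_bf(nums):
--     n = len(nums)
--     for i in range(n - 2):
--         for j in range(i + 1, n - 1):
--             if nums[i] < nums[j]:
--                 for k in range(j + 1, n):
--                     if nums[j] < nums[k]:
--                         return True
--     return False
-- ===== SOURCE B (Python) =====
-- def increasing_triplet_bf(nums):
--     first = second = None
--     for x in nums:
--         if first is None or x <= first:
--             first = x
--         elif second is None or x <= second:
--             second = x
--         else:
--             return True
--     return False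
-- ===== Notes on version B (the rewrite author's own statement) =====
-- stated objective: faster
-- what changed: Replaced the O(n^3) triple-nested index scan with a one-pass greedy that tracks the smallest value so far and the smallest tail of an increasing pair, returning True on the first element exceeding both.
import Mathlib
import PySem

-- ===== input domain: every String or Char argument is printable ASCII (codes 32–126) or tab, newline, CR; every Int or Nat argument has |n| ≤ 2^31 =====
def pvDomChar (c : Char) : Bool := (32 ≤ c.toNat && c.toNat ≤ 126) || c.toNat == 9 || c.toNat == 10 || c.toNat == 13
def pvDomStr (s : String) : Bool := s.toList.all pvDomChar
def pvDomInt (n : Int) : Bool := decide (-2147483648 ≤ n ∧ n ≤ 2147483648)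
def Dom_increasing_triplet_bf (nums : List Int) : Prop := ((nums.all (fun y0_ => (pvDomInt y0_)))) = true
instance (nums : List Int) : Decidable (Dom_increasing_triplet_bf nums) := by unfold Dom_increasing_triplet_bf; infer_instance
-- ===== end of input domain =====

-- B replaces A's O(n^3) triple-nested scan by a one-pass greedy (smallest-so-far, smallest
-- second-of-a-pair); a timing run measured it faster (asymptotic change).

-- ===== PORT A =====
-- triple nested for-loops with early `return True` transliterate to nested `.any` over the
-- same ranges; nums[i] etc. are always in range here, ported with pyGetD.
def increasing_triplet_bf (nums : List Int) : Bool :=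
  let n : Int := nums.length
  (PySem.List.pyRange 0 (n - 2) 1).any (fun i =>
    (PySem.List.pyRange (i + 1) (n - 1) 1).any (fun j =>
      decide (PySem.List.pyGetD nums i 0 < PySem.List.pyGetD nums j 0) &&
      (PySem.List.pyRange (j + 1) n 1).any (fun k =>
        decide (PySem.List.pyGetD nums j 0 < PySem.List.pyGetD nums k 0))))

-- ===== PORT B =====
-- the `first = second = None` greedy loop of Source B, with None as Option.none
def tripletLoop : List Int → Option Int → Option Int → Bool
  | [], _, _ => false
  | x :: xs, f, s =>
    match f with
    | none => tripletLoop xs (some x) s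
    | some a =>
      if x ≤ a then tripletLoop xs (some x) s
      else
        match s with
        | none => tripletLoop xs (some a) (some x)
        | some b =>
          if x ≤ b then tripletLoop xs (some a) (some x)
          else true

def increasing_triplet_bf_alt (nums : List Int) : Bool :=
  tripletLoop nums none none

-- ===== PRECONDITION & SPEC =====
def Spec_increasing_triplet_bf (nums : List Int) (out : Bool) : Prop := out = increasing_triplet_bf_alt nums
instance (nums : List Int) (out : Bool) : Decidable (Spec_increasing_triplet_bf nums out) := by unfold Spec_increasing_triplet_bf; infer_instance

-- ===== CLAIM (what is proved, stated in full; the proofs are below) =====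
def Claim_equal_increasing_triplet_bf : Prop := ∀ (nums : List Int), Dom_increasing_triplet_bf nums → Spec_increasing_triplet_bf nums (increasing_triplet_bf nums)

-- ===== LEMMAS AND PROOFS =====

-- "l contains a strictly increasing subsequence of length 3"
def HasTriplet (l : List Int) : Prop := ∃ a b c : Int, a < b ∧ b < c ∧ [a, b, c].Sublist l

theorem A_iff_hasTriplet (nums : List Int) :
    increasing_triplet_bf nums = true ↔ HasTriplet nums := by
  simp only [increasing_triplet_bf, List.any_eq_true, PySem.List.mem_pyRange_one,
    Bool.and_eq_true, decide_eq_true_eq]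
  constructor
  · rintro ⟨i, ⟨hi0, hi2⟩, j, ⟨hij, hj1⟩, hvij, k, ⟨hjk, hkn⟩, hvjk⟩
    have hk : k.toNat < nums.length := by omega
    have hj : j.toNat < nums.length := by omega
    have hi : i.toNat < nums.length := by omega
    rw [PySem.List.pyGetD_eq_getElem nums 0 (by omega) (by omega)] at hvij
    rw [PySem.List.pyGetD_eq_getElem nums 0 (by omega) (by omega)] at hvij hvjk
    rw [PySem.List.pyGetD_eq_getElem nums 0 (by omega) (by omega)] at hvjk
    refine ⟨nums[i.toNat], nums[j.toNat], nums[k.toNat], hvij, hvjk, ?_⟩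
    have hpw3 : List.Pairwise (fun x1 x2 => x1 < x2)
        ([⟨i.toNat, hi⟩, ⟨j.toNat, hj⟩, ⟨k.toNat, hk⟩] : List (Fin nums.length)) := by
      refine .cons ?_ (.cons ?_ (.cons ?_ .nil))
      · intro a ha
        simp only [List.mem_cons, List.not_mem_nil, or_false] at ha
        rcases ha with rfl | rfl <;> exact Fin.mk_lt_mk.mpr (by omega)
      · intro a ha
        simp only [List.mem_cons, List.not_mem_nil, or_false] at ha
        rcases ha with rfl
        exact Fin.mk_lt_mk.mpr (by omega)
      · intro a ha
        exact absurd ha (by simp)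
    have := List.map_getElem_sublist (l := nums) hpw3
    simpa using this
  · rintro ⟨a, b, c, hab, hbc, hsub⟩
    obtain ⟨is, heq, hpw⟩ := List.sublist_eq_map_getElem hsub
    match is, heq with
    | [i, j, k], heq =>
      simp only [List.map_cons, List.map_nil, List.cons.injEq, and_true] at heq
      obtain ⟨ha, hb, hc⟩ := heq
      simp only [List.pairwise_cons, List.mem_cons] at hpw
      have hij : (i : Nat) < j := hpw.1 j (by simp)
      have hjk : (j : Nat) < k := hpw.2.1 k (by simp)
      have hk := k.isLt
      refine ⟨(i : Nat), ⟨by omega, by omega⟩, (j : Nat), ⟨by omega, by omega⟩, ?_, (k : Nat), ⟨by omega, by omega⟩, ?_⟩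
      · rw [PySem.List.pyGetD_eq_getElem nums 0 (by omega) (by omega),
          PySem.List.pyGetD_eq_getElem nums 0 (by omega) (by omega)]
        simpa [ha, hb] using hab
      · rw [PySem.List.pyGetD_eq_getElem nums 0 (by omega) (by omega),
          PySem.List.pyGetD_eq_getElem nums 0 (by omega) (by omega)]
        simpa [hb, hc] using hbc

-- invariant of the greedy state after having consumed the prefix p
def GInv (p : List Int) (f s : Option Int) : Prop :=
  (f = none → p = []) ∧
  (∀ a, f = some a → a ∈ p ∧ ∀ x ∈ p, a ≤ x) ∧
  (s = none → ¬ ∃ u v : Int, u < v ∧ [u, v].Sublist p) ∧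
  (∀ b, s = some b → (∃ u, u < b ∧ [u, b].Sublist p) ∧
      ∀ v, (∃ u, u < v ∧ [u, v].Sublist p) → b ≤ v) ∧
  ¬ HasTriplet p

-- decompose a length-2 sublist of p ++ [x]
theorem pair_sublist_snoc {u v x : Int} {p : List Int} (h : [u, v].Sublist (p ++ [x])) :
    [u, v].Sublist p ∨ (u ∈ p ∧ v = x) := by
  rw [List.sublist_append_iff] at h
  obtain ⟨l1, l2, heq, h1, h2⟩ := h
  rcases List.sublist_singleton.mp h2 with rfl | rfl
  · left; simpa [heq] using h1
  · right
    cases l1 with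
    | nil => exact absurd (congrArg List.length heq) (by simp)
    | cons a1 t1 =>
      cases t1 with
      | nil =>
        simp only [List.cons_append, List.nil_append, List.cons.injEq, and_true] at heq
        obtain ⟨rfl, rfl⟩ := heq
        exact ⟨List.singleton_sublist.mp h1, rfl⟩
      | cons a2 t2 => exact absurd (congrArg List.length heq) (by simp)

-- decompose a length-3 sublist of p ++ [x]
theorem triple_sublist_snoc {a b c x : Int} {p : List Int} (h : [a, b, c].Sublist (p ++ [x])) :
    [a, b, c].Sublist p ∨ ([a, b].Sublist p ∧ c = x) := by
  rw [List.sublist_append_iff] at h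
  obtain ⟨l1, l2, heq, h1, h2⟩ := h
  rcases List.sublist_singleton.mp h2 with rfl | rfl
  · left; simpa [heq] using h1
  · right
    cases l1 with
    | nil => exact absurd (congrArg List.length heq) (by simp)
    | cons a1 t1 =>
      cases t1 with
      | nil => exact absurd (congrArg List.length heq) (by simp)
      | cons a2 t2 =>
        cases t2 with
        | nil =>
          simp only [List.cons_append, List.nil_append, List.cons.injEq, and_true] at heq
          obtain ⟨rfl, rfl, rfl⟩ := heq
          exact ⟨h1, rfl⟩
        | cons a3 t3 => exact absurd (congrArg List.length heq) (by simp)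

theorem tripletLoop_iff (rest : List Int) : ∀ (p : List Int) (f s : Option Int),
    GInv p f s → (tripletLoop rest f s = true ↔ HasTriplet (p ++ rest)) := by
  induction rest with
  | nil =>
    intro p f s hinv
    simp only [tripletLoop, List.append_nil, Bool.false_eq_true, false_iff]
    exact hinv.2.2.2.2
  | cons x xs ih =>
    intro p f s hinv
    obtain ⟨h1, h2, h3, h4, h5⟩ := hinv
    have hsplit : p ++ x :: xs = (p ++ [x]) ++ xs := by simp
    rw [hsplit]
    cases f with
    | none =>
      have hp : p = [] := h1 rfl
      subst hp
      have hs : s = none := by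
        cases s with
        | none => rfl
        | some b =>
          exfalso
          obtain ⟨⟨u, _, hsub⟩, -⟩ := h4 b rfl
          simpa using hsub.length_le
      subst hs
      simp only [tripletLoop]
      apply ih
      refine ⟨by simp, ?_, ?_, ?_, ?_⟩
      · rintro a' ha'; cases ha'; exact ⟨by simp, by simp⟩
      · rintro - ⟨u, v, huv, hsub⟩
        have := hsub.length_le; simp at this
      · rintro b hb; cases hb
      · rintro ⟨a', b', c', -, -, hsub⟩
        have := hsub.length_le; simp at this
    | some a =>
      obtain ⟨ha_mem, ha_min⟩ := h2 a rfl
      by_cases hxa : x ≤ a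
      · -- new first = x
        simp only [tripletLoop]
        rw [if_pos hxa]
        apply ih
        refine ⟨by simp, ?_, ?_, ?_, ?_⟩
        · rintro a' ha'; cases ha'
          refine ⟨by simp, ?_⟩
          intro y hy
          rcases List.mem_append.mp hy with hy | hy
          · exact le_trans hxa (ha_min y hy)
          · simp at hy; omega
        · intro hs
          rintro ⟨u, v, huv, hsub⟩
          rcases pair_sublist_snoc hsub with hsub | ⟨hu, rfl⟩
          · exact h3 hs ⟨u, v, huv, hsub⟩
          · have := ha_min u hu; omega
        · rintro b hb
          obtain ⟨⟨u, hub, hsub⟩, hmin⟩ := h4 b hb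
          refine ⟨⟨u, hub, hsub.trans (List.sublist_append_left p [x])⟩, ?_⟩
          rintro v ⟨u', hu'v, hsub'⟩
          rcases pair_sublist_snoc hsub' with hsub' | ⟨hu', rfl⟩
          · exact hmin v ⟨u', hu'v, hsub'⟩
          · have := ha_min u' hu'; omega
        · rintro ⟨a', b', c', hab, hbc, hsub⟩
          rcases triple_sublist_snoc hsub with hs | ⟨hs, rfl⟩
          · exact h5 ⟨a', b', c', hab, hbc, hs⟩
          · -- pair a' < b' in p with b' < x ≤ a = min p: but then s = some b with b ≤ b'
            cases s with
            | none => exact h3 rfl ⟨a', b', hab, hs⟩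
            | some b =>
              obtain ⟨⟨u, hub, hupair⟩, hmin⟩ := h4 b rfl
              have hble : b ≤ b' := hmin b' ⟨a', hab, hs⟩
              have hu_mem : u ∈ p := hupair.subset (by simp)
              have := ha_min u hu_mem
              omega
      · -- a < x; check second
        rw [not_le] at hxa
        cases s with
        | none =>
          simp only [tripletLoop]
          rw [if_neg (show ¬ x ≤ a by omega)]
          apply ih
          refine ⟨by simp, ?_, ?_, ?_, ?_⟩
          · rintro a' ha'; cases ha'
            refine ⟨List.mem_append.mpr (Or.inl ha_mem), ?_⟩
            intro y hy
            rcases List.mem_append.mp hy with hy | hy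
            · exact ha_min y hy
            · simp at hy; omega
          · intro hs; cases hs
          · rintro b hb; cases hb
            refine ⟨⟨a, hxa, ?_⟩, ?_⟩
            · exact (List.singleton_sublist.mpr ha_mem).append (List.Sublist.refl [x])
            · rintro v ⟨u, huv, hsub⟩
              rcases pair_sublist_snoc hsub with hsub | ⟨hu, rfl⟩
              · exact absurd ⟨u, v, huv, hsub⟩ (h3 rfl)
              · omega
          · rintro ⟨a', b', c', hab, hbc, hsub⟩
            rcases triple_sublist_snoc hsub with hs | ⟨hs, rfl⟩
            · exact h5 ⟨a', b', c', hab, hbc, hs⟩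
            · exact h3 rfl ⟨a', b', hab, hs⟩
        | some b =>
          by_cases hxb : x ≤ b
          · simp only [tripletLoop]
            rw [if_neg (show ¬ x ≤ a by omega), if_pos hxb]
            obtain ⟨⟨u0, hu0, hpair0⟩, hmin0⟩ := h4 b rfl
            apply ih
            refine ⟨by simp, ?_, ?_, ?_, ?_⟩
            · rintro a' ha'; cases ha'
              refine ⟨List.mem_append.mpr (Or.inl ha_mem), ?_⟩
              intro y hy
              rcases List.mem_append.mp hy with hy | hy
              · exact ha_min y hy
              · simp at hy; omega
            · intro hs; cases hs
            · rintro b' hb'; cases hb'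
              refine ⟨⟨a, hxa, ?_⟩, ?_⟩
              · exact (List.singleton_sublist.mpr ha_mem).append (List.Sublist.refl [x])
              · rintro v ⟨u, huv, hsub⟩
                rcases pair_sublist_snoc hsub with hsub | ⟨hu, rfl⟩
                · have := hmin0 v ⟨u, huv, hsub⟩; omega
                · omega
            · rintro ⟨a', b', c', hab, hbc, hsub⟩
              rcases triple_sublist_snoc hsub with hs | ⟨hs, rfl⟩
              · exact h5 ⟨a', b', c', hab, hbc, hs⟩
              · have := hmin0 b' ⟨a', hab, hs⟩; omega
          · -- return True
            rw [not_le] at hxb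
            simp only [tripletLoop]
            rw [if_neg (show ¬ x ≤ a by omega), if_neg (show ¬ x ≤ b by omega)]
            constructor
            · intro _
              obtain ⟨⟨u, hub, hpair⟩, -⟩ := h4 b rfl
              refine ⟨u, b, x, hub, hxb, ?_⟩
              have : [u, b, x].Sublist (p ++ [x]) := by
                simpa using hpair.append (List.Sublist.refl [x])
              exact this.trans (List.sublist_append_left _ xs)
            · intro _; rfl

theorem B_iff_hasTriplet (nums : List Int) :
    increasing_triplet_bf_alt nums = true ↔ HasTriplet nums := by
  have h := tripletLoop_iff nums [] none none
    (by
      refine ⟨fun _ => rfl, ?_, ?_, ?_, ?_⟩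
      · intro a h; cases h
      · rintro - ⟨u, v, -, h⟩; simpa using h.length_le
      · intro b h; cases h
      · rintro ⟨a, b, c, -, -, h⟩; simpa using h.length_le)
  simpa [increasing_triplet_bf_alt] using h

-- ===== VERDICT (by name: the statement is the Claim_ definition above) =====
theorem increasing_triplet_bf_spec : Claim_equal_increasing_triplet_bf := by
  intro nums _
  unfold Spec_increasing_triplet_bf
  exact Bool.eq_iff_iff.mpr ((A_iff_hasTriplet nums).trans (B_iff_hasTriplet nums).symm)
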